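-- pv_equiv track=rewrite | github.com/yurioliveira3/sql-formatter | python/format_sql_ansi.py | restore_standalone_comments
-- ===== SOURCE A (Python) =====
-- def restore_standalone_comments(sql: str, stored: list) -> str:
--     """
--     Reinsere linhas -- de JOIN (removidas por strip_join_comments) antes da
--     linha da tabela correspondente. Usa o fragmento inicial da tabela como chave.
--     """
--     for comment, fragment in stored:
--         if not fragment:
--             continue
--         lines = sql.split("\n")
--         norm_frag = fragment[:20]
--         for i, line in enumerate(lines):
--             norm_line = " ".join(line.strip().split())
--             if norm_line.startswith(norm_frag):
--                 # Copia a indentação da linha de referência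
--                 indent = ""
--                 for ch in line:
--                     if ch in (" ", "\t"):
--                         indent += ch
--                     else:
--                         break
--                 lines.insert(i, indent + comment)
--                 sql = "\n".join(lines)
--                 break
--     return sql
-- ===== SOURCE B (Python) =====
-- def restore_standalone_comments(sql: str, stored: list) -> str:
--     """Split once, cache normalized lines, splice insertions in place, join once."""
--     lines = sql.split("\n")
--     norms = [" ".join(l.strip().split()) for l in lines]
--     for comment, fragment in stored:
--         if not fragment:
--             continue
--         frag = fragment[:20]
--         for i, nl in enumerate(norms):
--             if nl.startswith(frag):
--                 line = lines[i]
--                 indent = line[:len(line) - len(line.lstrip(" \t"))]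
--                 block = (indent + comment).split("\n")
--                 lines[i:i] = block
--                 norms[i:i] = [" ".join(b.strip().split()) for b in block]
--                 break
--     return "\n".join(lines)
-- ===== Notes on version B (the rewrite author's own statement) =====
-- stated objective: faster
-- what changed: B splits the SQL into lines once and caches each line's normalized form, splicing every inserted comment (and its normalization) directly into those lists and joining once at the end, instead of A's re-splitting, re-normalizing and re-joining the whole text for every stored comment.
import Mathlib
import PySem

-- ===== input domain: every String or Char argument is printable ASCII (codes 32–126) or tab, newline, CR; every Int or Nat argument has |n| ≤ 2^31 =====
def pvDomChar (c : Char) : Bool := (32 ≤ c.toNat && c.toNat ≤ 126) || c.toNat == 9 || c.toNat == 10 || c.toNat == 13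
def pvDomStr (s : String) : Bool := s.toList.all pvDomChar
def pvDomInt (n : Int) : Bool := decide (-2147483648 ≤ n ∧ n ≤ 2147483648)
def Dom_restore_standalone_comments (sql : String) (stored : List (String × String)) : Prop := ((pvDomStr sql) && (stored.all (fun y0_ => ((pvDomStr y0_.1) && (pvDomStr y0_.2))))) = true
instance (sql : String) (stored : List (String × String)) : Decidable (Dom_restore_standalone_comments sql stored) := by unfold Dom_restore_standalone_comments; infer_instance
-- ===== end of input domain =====

-- B re-implements A by splitting the SQL once, caching each line's normalized form, splicing
-- insertions into the line list, and joining once at the end (A re-splits, re-normalizes and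
-- re-joins the whole text on every stored comment).

-- shared by both ports: " ".join(line.strip().split())
def pvNorm (l : List Char) : List Char :=
  PySem.Chars.join [' '] (PySem.Chars.split₀ (PySem.Chars.strip l))

-- ===== PORT A =====
-- A's indent loop: for ch in line: if ch in (" ", "\t"): indent += ch else: break
def pvIndentA : List Char → List Char
  | [] => []
  | ch :: rest => if ch = ' ' ∨ ch = '\t' then ch :: pvIndentA rest else []

-- A's inner loop: for i, line in enumerate(lines): if norm_line.startswith(norm_frag): … break
def pvFindA (frag : List Char) : List (List Char) → Option (Nat × List Char)
  | [] => none
  | l :: rest =>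
      if PySem.Chars.startswith (pvNorm l) frag then some (0, l)
      else (pvFindA frag rest).map (fun p => (p.1 + 1, p.2))

-- one iteration of A's outer loop (state: the current sql text)
def pvStepA (sql : List Char) (cf : String × String) : List Char :=
  if cf.2.toList = [] then sql
  else
    let lines := PySem.Chars.splitOn sql ['\n']
    let frag := PySem.List.slice cf.2.toList none (some 20)
    match pvFindA frag lines with
    | none => sql
    | some (i, line) =>
        PySem.Chars.join ['\n'] (PySem.List.insert lines (i : Int) (pvIndentA line ++ cf.1.toList))

def restore_standalone_comments (sql : String) (stored : List (String × String)) : String :=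
  String.ofList (stored.foldl pvStepA sql.toList)

-- ===== PORT B =====
def pvIsIndentChar (c : Char) : Bool := c = ' ' || c = '\t'

-- B's inner scan over the cached normalized lines
def pvFindB (frag : List Char) : List (List Char) → Option Nat
  | [] => none
  | n :: rest =>
      if PySem.Chars.startswith n frag then some 0
      else (pvFindB frag rest).map (· + 1)

-- one iteration of B's loop (state: the line list and its cached normalizations);
-- line.lstrip(" \t") is ported by hand as dropWhile (exact: drops exactly the leading " \t" chars),
-- lines[i:i] = block as take/drop splicing (exact for 0 ≤ i ≤ len)
def pvStepB (st : List (List Char) × List (List Char)) (cf : String × String) :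
    List (List Char) × List (List Char) :=
  if cf.2.toList = [] then st
  else
    let frag := PySem.List.slice cf.2.toList none (some 20)
    match pvFindB frag st.2 with
    | none => st
    | some i =>
        let line := st.1.getD i []
        let indent := line.take (line.length - (line.dropWhile pvIsIndentChar).length)
        let block := PySem.Chars.splitOn (indent ++ cf.1.toList) ['\n']
        (st.1.take i ++ block ++ st.1.drop i,
         st.2.take i ++ block.map pvNorm ++ st.2.drop i)

def restore_standalone_comments_alt (sql : String) (stored : List (String × String)) : String :=
  let lines := PySem.Chars.splitOn sql.toList ['\n']
  let st := stored.foldl pvStepB (lines, lines.map pvNorm)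
  String.ofList (PySem.Chars.join ['\n'] st.1)

-- ===== PRECONDITION & SPEC =====
def Spec_restore_standalone_comments (sql : String) (stored : List (String × String)) (out : String) : Prop := out = restore_standalone_comments_alt sql stored
instance (sql : String) (stored : List (String × String)) (out : String) : Decidable (Spec_restore_standalone_comments sql stored out) := by unfold Spec_restore_standalone_comments; infer_instance

-- ===== CLAIM (what is proved, stated in full; the proofs are below) =====
def Claim_equal_restore_standalone_comments : Prop := ∀ (sql : String) (stored : List (String × String)), Dom_restore_standalone_comments sql stored → Spec_restore_standalone_comments sql stored (restore_standalone_comments sql stored)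

-- ===== LEMMAS AND PROOFS =====

-- reference splitter: the value of s.split("\n")
def pvSplit : List Char → List (List Char)
  | [] => [[]]
  | c :: rest =>
      if c = '\n' then [] :: pvSplit rest
      else match pvSplit rest with
        | [] => [[c]]
        | q :: qs => (c :: q) :: qs

theorem pvSplit_ne_nil (s : List Char) : pvSplit s ≠ [] := by
  cases s with
  | nil => simp [pvSplit]
  | cons c rest =>
    simp only [pvSplit]
    split
    · simp
    · split <;> simp

theorem pvSplit_single {a : List Char} (h : '\n' ∉ a) : pvSplit a = [a] := by
  induction a with
  | nil => rfl
  | cons c rest ih =>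
    simp only [List.mem_cons, not_or] at h
    simp [pvSplit, Ne.symm h.1, ih h.2]

theorem pvSplit_newline_append (x r : List Char) :
    pvSplit (x ++ '\n' :: r) = pvSplit x ++ pvSplit r := by
  induction x with
  | nil => simp [pvSplit]
  | cons c rest ih =>
    by_cases h : c = '\n'
    · simp [pvSplit, h, ih]
    · simp only [List.cons_append, pvSplit, h, if_false, ih]
      cases hr : pvSplit rest with
      | nil => exact absurd hr (pvSplit_ne_nil rest)
      | cons q qs => simp

theorem pvSplit_no_newline {s p : List Char} (h : p ∈ pvSplit s) : '\n' ∉ p := by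
  induction s generalizing p with
  | nil => simp [pvSplit] at h; subst h; simp
  | cons c rest ih =>
    by_cases hc : c = '\n'
    · simp [pvSplit, hc] at h
      rcases h with h | h
      · simp [h]
      · exact ih h
    · cases hr : pvSplit rest with
      | nil => exact absurd hr (pvSplit_ne_nil rest)
      | cons q qs =>
        simp [pvSplit, hc, hr] at h
        rcases h with h | h
        · subst h
          have hq : '\n' ∉ q := ih (hr ▸ List.mem_cons_self ..)
          simp only [List.mem_cons, not_or]
          exact ⟨fun he => hc he.symm, hq⟩
        · exact ih (hr ▸ List.mem_cons_of_mem _ h)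

theorem join_pvSplit (s : List Char) : List.intercalate ['\n'] (pvSplit s) = s := by
  induction s with
  | nil => simp [pvSplit, List.intercalate]
  | cons c rest ih =>
    by_cases h : c = '\n'
    · subst h
      simp only [pvSplit, if_pos rfl]
      cases hr : pvSplit rest with
      | nil => exact absurd hr (pvSplit_ne_nil rest)
      | cons q qs => rw [← hr]; simpa [List.intercalate, hr] using hr ▸ ih
    · simp only [pvSplit, h, if_false]
      cases hr : pvSplit rest with
      | nil => exact absurd hr (pvSplit_ne_nil rest)
      | cons q qs =>
        have := hr ▸ ih
        cases qs with
        | nil => simpa [List.intercalate] using this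
        | cons q' qs' => simpa [List.intercalate] using this

theorem pvSplitOn_go_spec (fuel : Nat) (l cur : List Char) (acc : List (List Char))
    (h : l.length < fuel) :
    PySem.Chars.splitOn.go ['\n'] fuel l cur acc =
      acc.reverse ++ (pvSplit l).modifyHead (cur.reverse ++ ·) := by
  induction fuel generalizing l cur acc with
  | zero => omega
  | succ f ih =>
    cases l with
    | nil =>
      simp [PySem.Chars.splitOn.go, pvSplit]
    | cons c rest =>
      have hstep : PySem.Chars.splitOn.go ['\n'] (f+1) (c::rest) cur acc =
          if c = '\n' then PySem.Chars.splitOn.go ['\n'] f rest [] (cur.reverse :: acc)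
          else PySem.Chars.splitOn.go ['\n'] f rest (c :: cur) acc := by
        rw [PySem.Chars.splitOn.go]
        by_cases hc : c = '\n'
        · simp only [List.isPrefixOf, hc, beq_self_eq_true, Bool.true_and, List.isPrefixOf]
          simp
        · have hb : (['\n'].isPrefixOf (c :: rest)) = false := by
            simp [List.isPrefixOf]; exact fun h' => hc h'.symm
          simp [hb, hc]
      rw [hstep]
      simp only [List.length_cons] at h
      by_cases hc : c = '\n'
      · rw [if_pos hc, ih rest [] (cur.reverse :: acc) (by omega)]
        cases hr : pvSplit rest with
        | nil => exact absurd hr (pvSplit_ne_nil rest)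
        | cons q qs => simp [pvSplit, hc, hr]
      · rw [if_neg hc, ih rest (c :: cur) acc (by omega)]
        simp only [pvSplit, hc, if_false]
        cases hr : pvSplit rest with
        | nil => exact absurd hr (pvSplit_ne_nil rest)
        | cons q qs => simp

theorem splitOn_eq_pvSplit (s : List Char) : PySem.Chars.splitOn s ['\n'] = pvSplit s := by
  rw [PySem.Chars.splitOn, pvSplitOn_go_spec _ _ _ _ (by omega)]
  cases hr : pvSplit s with
  | nil => exact absurd hr (pvSplit_ne_nil s)
  | cons q qs => simp

theorem pvSplit_join {post : List (List Char)} (hnl : ∀ p ∈ post, '\n' ∉ p) (hne : post ≠ []) :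
    pvSplit (List.intercalate ['\n'] post) = post := by
  induction post with
  | nil => exact absurd rfl hne
  | cons p rest ih =>
    cases rest with
    | nil => simpa [List.intercalate] using pvSplit_single (hnl p (by simp))
    | cons p' rest' =>
      have : List.intercalate ['\n'] (p :: p' :: rest') = p ++ '\n' :: List.intercalate ['\n'] (p' :: rest') := by
        simp [List.intercalate]
      rw [this, pvSplit_newline_append, pvSplit_single (hnl p (by simp)),
        ih (fun q hq => hnl q (List.mem_cons_of_mem _ hq)) (by simp)]
      rfl

theorem pvSplit_join_insert {pre post : List (List Char)} (x : List Char)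
    (hpre : ∀ p ∈ pre, '\n' ∉ p) (hpost : ∀ p ∈ post, '\n' ∉ p) (hne : post ≠ []) :
    pvSplit (List.intercalate ['\n'] (pre ++ x :: post)) = pre ++ pvSplit x ++ post := by
  induction pre with
  | nil =>
    have : List.intercalate ['\n'] (x :: post) = x ++ '\n' :: List.intercalate ['\n'] post := by
      cases post with
      | nil => exact absurd rfl hne
      | cons a b => simp [List.intercalate]
    rw [List.nil_append, this, pvSplit_newline_append, pvSplit_join hpost hne, List.nil_append]
  | cons p pre' ih =>
    have : List.intercalate ['\n'] ((p :: pre') ++ x :: post) =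
        p ++ '\n' :: List.intercalate ['\n'] (pre' ++ x :: post) := by
      cases pre' <;> simp [List.intercalate]
    rw [this, pvSplit_newline_append, pvSplit_single (hpre p (by simp)),
      ih (fun q hq => hpre q (List.mem_cons_of_mem _ hq))]
    simp

theorem pvFindB_map (frag : List Char) (lines : List (List Char)) :
    pvFindB frag (lines.map pvNorm) = (pvFindA frag lines).map Prod.fst := by
  induction lines with
  | nil => rfl
  | cons l rest ih =>
    simp only [List.map_cons, pvFindB, pvFindA]
    split
    · rfl
    · rw [ih]; cases pvFindA frag rest <;> rfl

theorem pvFindA_get {frag : List Char} {lines : List (List Char)} {i : Nat} {ln : List Char}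
    (h : pvFindA frag lines = some (i, ln)) : lines[i]? = some ln := by
  induction lines generalizing i with
  | nil => simp [pvFindA] at h
  | cons l rest ih =>
    simp only [pvFindA] at h
    split at h
    · simp at h
      obtain ⟨hi, hl⟩ := h
      subst hl
      simp [← hi]
    · cases hr : pvFindA frag rest with
      | none => rw [hr] at h; simp at h
      | some p =>
        obtain ⟨j, ln'⟩ := p
        rw [hr] at h
        simp at h
        obtain ⟨hi, hl⟩ := h
        subst hl
        rw [← hi]
        simpa using ih hr

theorem pvIndentA_eq (l : List Char) :
    pvIndentA l = l.take (l.length - (l.dropWhile pvIsIndentChar).length) := by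
  have h1 : pvIndentA l = l.takeWhile pvIsIndentChar := by
    induction l with
    | nil => rfl
    | cons c rest ih =>
      by_cases hc : c = ' ' ∨ c = '\t'
      · have hb : pvIsIndentChar c = true := by
          simp only [pvIsIndentChar, Bool.or_eq_true, decide_eq_true_eq]; exact hc
        simp [pvIndentA, List.takeWhile, hc, hb, ih]
      · push_neg at hc
        have hb : pvIsIndentChar c = false := by
          simp [pvIsIndentChar, hc.1, hc.2]
        simp [pvIndentA, List.takeWhile, hc.1, hc.2, hb]
  have hlen : l.length = (l.takeWhile pvIsIndentChar).length + (l.dropWhile pvIsIndentChar).length := by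
    rw [← List.length_append, List.takeWhile_append_dropWhile]
  have h2 := List.prefix_iff_eq_take.mp (List.takeWhile_prefix (l := l) pvIsIndentChar)
  rw [h1, hlen, Nat.add_sub_cancel, ← h2]

theorem pvInsert_eq (xs : List (List Char)) (i : Nat) (v : List Char) :
    PySem.List.insert xs (i : Int) v = xs.take i ++ v :: xs.drop i := by
  simp [PySem.List.insert, PySem.List.sliceIndices]
  have h0 : (min (i:Int) (xs.length:Int)).toNat = min i xs.length := by omega
  rw [if_neg (by omega : ¬ ((i:Int) < 0)), h0, ← List.take_eq_take_min, ← List.drop_eq_drop_min]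

theorem pvStep_equiv (sql : List Char) (st : List (List Char) × List (List Char))
    (h1 : st.1 = pvSplit sql) (h2 : st.2 = st.1.map pvNorm) (cf : String × String) :
    (pvStepB st cf).1 = pvSplit (pvStepA sql cf) ∧
      (pvStepB st cf).2 = (pvStepB st cf).1.map pvNorm := by
  by_cases hf : cf.2.toList = []
  · simp only [pvStepA, pvStepB, if_pos hf]
    exact ⟨h1 ▸ rfl, h2⟩
  · simp only [pvStepA, pvStepB, if_neg hf, splitOn_eq_pvSplit, ← h1]
    have hB : pvFindB (PySem.List.slice cf.2.toList none (some 20)) st.2 =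
        (pvFindA (PySem.List.slice cf.2.toList none (some 20)) st.1).map Prod.fst := by
      rw [h2, pvFindB_map]
    cases hA : pvFindA (PySem.List.slice cf.2.toList none (some 20)) st.1 with
    | none =>
      rw [hB, hA]
      exact ⟨h1, h2⟩
    | some p =>
      obtain ⟨i, ln⟩ := p
      rw [hB, hA]
      simp only [Option.map_some]
      have hget : st.1[i]? = some ln := pvFindA_get hA
      have hlt : i < st.1.length := by
        by_contra hge
        rw [List.getElem?_eq_none (by omega)] at hget
        exact absurd hget (by simp)
      have hline : st.1.getD i [] = ln := by
        rw [List.getD_eq_getElem?_getD, hget]; rfl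
      have hmem : ln ∈ pvSplit sql := h1 ▸ List.mem_of_getElem? hget
      have hindent : ln.take (ln.length - (ln.dropWhile pvIsIndentChar).length) = pvIndentA ln :=
        (pvIndentA_eq ln).symm
      constructor
      · rw [hline, hindent]
        show _ = pvSplit (List.intercalate ['\n'] (PySem.List.insert st.1 (i : Int) (pvIndentA ln ++ cf.1.toList)))
        rw [pvInsert_eq, pvSplit_join_insert]
        · intro p hp
          exact pvSplit_no_newline (h1 ▸ List.mem_of_mem_take hp)
        · intro p hp
          exact pvSplit_no_newline (h1 ▸ List.mem_of_mem_drop hp)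
        · intro hd
          have := List.length_drop (l := st.1) (i := i)
          rw [hd] at this
          simp at this
          omega
      · rw [h2, hline, hindent]
        simp [List.map_take, List.map_drop]

theorem pvFold_equiv (stored : List (String × String)) (sql : List Char)
    (st : List (List Char) × List (List Char))
    (h1 : st.1 = pvSplit sql) (h2 : st.2 = st.1.map pvNorm) :
    (stored.foldl pvStepB st).1 = pvSplit (stored.foldl pvStepA sql) := by
  induction stored generalizing sql st with
  | nil => exact h1
  | cons cf rest ih =>
    simp only [List.foldl_cons]
    exact ih (pvStepA sql cf) (pvStepB st cf) (pvStep_equiv sql st h1 h2 cf).1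
      (pvStep_equiv sql st h1 h2 cf).2

-- ===== VERDICT (by name: the statement is the Claim_ definition above) =====
theorem restore_standalone_comments_spec : Claim_equal_restore_standalone_comments := by
  intro sql stored _
  unfold Spec_restore_standalone_comments restore_standalone_comments restore_standalone_comments_alt
  have h := pvFold_equiv stored sql.toList (PySem.Chars.splitOn sql.toList ['\n'],
    (PySem.Chars.splitOn sql.toList ['\n']).map pvNorm) (splitOn_eq_pvSplit _)
    (by rw [splitOn_eq_pvSplit])
  simp only [h]
  rw [show PySem.Chars.join ['\n'] (pvSplit (stored.foldl pvStepA sql.toList)) =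
      List.intercalate ['\n'] (pvSplit (stored.foldl pvStepA sql.toList)) from rfl,
    join_pvSplit]
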